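-- pv_equiv track=rewrite | github.com/jrmcornish/cif | add_hparams.py | key_value_differs
-- ===== SOURCE A (Python) =====
-- def key_value_differs(key, configs):
--     if key not in configs[0]:
--         return True
--
--     val = configs[0][key]
--
--     for c in configs:
--         if key not in c or c[key] != val:
--             return True
--
--     return False
-- ===== SOURCE B (Python) =====
-- _MISSING = object()
--
--
-- def key_value_differs(key, configs):
--     if key not in configs[0]:
--         return True
--     # All configs carry the same value for key iff every ADJACENT pair agrees
--     # (a.get vs b.get with a unique sentinel for a missing key); no reference
--     # value is kept around.
--     return any(a.get(key, _MISSING) != b.get(key, _MISSING)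
--                for a, b in zip(configs, configs[1:]))
-- ===== Notes on version B (the rewrite author's own statement) =====
-- stated objective: alternative
-- what changed: Replaces A's scan comparing every config against a saved reference value from configs[0] with an adjacent-pair comparison over zip(configs, configs[1:]) using a unique missing-key sentinel; no reference value is maintained.
-- outside the precondition, e.g. on key_value_differs('a', []): A raises IndexError, B raises IndexError
import Mathlib
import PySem

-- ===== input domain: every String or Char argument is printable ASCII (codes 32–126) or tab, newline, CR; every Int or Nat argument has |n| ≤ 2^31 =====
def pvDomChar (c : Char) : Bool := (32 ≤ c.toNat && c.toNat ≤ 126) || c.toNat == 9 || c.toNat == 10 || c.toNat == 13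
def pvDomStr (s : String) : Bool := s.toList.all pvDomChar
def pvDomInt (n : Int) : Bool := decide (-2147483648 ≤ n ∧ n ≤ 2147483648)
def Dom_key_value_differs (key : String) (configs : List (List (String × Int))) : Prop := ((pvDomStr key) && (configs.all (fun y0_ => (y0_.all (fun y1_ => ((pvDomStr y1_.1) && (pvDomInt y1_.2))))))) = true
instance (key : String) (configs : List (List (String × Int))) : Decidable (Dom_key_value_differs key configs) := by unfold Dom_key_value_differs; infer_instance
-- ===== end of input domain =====

-- B replaces A's scan against a saved reference value from configs[0] by an
-- adjacent-pair comparison over zip(configs, configs[1:]) (objective: alternative).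

-- shared helper: first-match lookup in an association-list dict ('key in c' / 'c[key]' / 'c.get(key)')
def pvLookup (c : List (String × Int)) (k : String) : Option Int :=
  match c with
  | [] => none
  | (k', v) :: rest => if k' = k then some v else pvLookup rest k

-- ===== PORT A =====
-- A's for-loop: returns True at the first config missing the key or carrying a different value
def kvdLoop (key : String) (val : Int) : List (List (String × Int)) → Bool
  | [] => false
  | c :: rest =>
    match pvLookup c key with
    | none => true
    | some v => if v ≠ val then true else kvdLoop key val rest

def key_value_differs (key : String) (configs : List (List (String × Int))) : Bool :=
  match configs with
  | [] => false  -- unreachable: Python raises IndexError here; excluded by Pre_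
  | c0 :: _ =>
    match pvLookup c0 key with
    | none => true
    | some val => kvdLoop key val configs

-- ===== PORT B =====
def key_value_differs_alt (key : String) (configs : List (List (String × Int))) : Bool :=
  match configs with
  | [] => false  -- unreachable: Python raises IndexError here; excluded by Pre_
  | c0 :: rest =>
    match pvLookup c0 key with
    | none => true
    | some _ =>
      -- any(a.get(key, _MISSING) != b.get(key, _MISSING) for a, b in zip(configs, configs[1:]))
      (configs.zip rest).any (fun p => pvLookup p.1 key != pvLookup p.2 key)

-- ===== PRECONDITION & SPEC =====
-- Pre_ excludes only the empty configs list, on which Python A raises IndexError.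
def Pre_key_value_differs (key : String) (configs : List (List (String × Int))) : Prop := configs ≠ []
instance (key : String) (configs : List (List (String × Int))) : Decidable (Pre_key_value_differs key configs) := by unfold Pre_key_value_differs; infer_instance

def pvWitness_key_value_differs : String × (List (List (String × Int))) := ("a", [[("a", 1)], [("a", 2)]])

def Spec_key_value_differs (key : String) (configs : List (List (String × Int))) (out : Bool) : Prop := out = key_value_differs_alt key configs
instance (key : String) (configs : List (List (String × Int))) (out : Bool) : Decidable (Spec_key_value_differs key configs out) := by unfold Spec_key_value_differs; infer_instance

-- ===== CLAIM (what is proved, stated in full; the proofs are below) =====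
def Claim_equal_key_value_differs : Prop := ∀ (key : String) (configs : List (List (String × Int))), Dom_key_value_differs key configs → Pre_key_value_differs key configs → Spec_key_value_differs key configs (key_value_differs key configs)

-- ===== LEMMAS AND PROOFS =====

theorem kvdLoop_eq_any (key : String) (val : Int) (cs : List (List (String × Int))) :
    kvdLoop key val cs = cs.any (fun c => pvLookup c key != some val) := by
  induction cs with
  | nil => rfl
  | cons c rest ih =>
    simp only [kvdLoop, List.any_cons, ← ih]
    cases h : pvLookup c key with
    | none => simp
    | some v =>
      by_cases hv : v = val
      · subst hv; simp
      · simp [hv]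

-- "everything differs from the head" = "some adjacent pair differs"
theorem any_ne_head_eq_any_adjacent {α : Type} [BEq α] [LawfulBEq α] (x : α) (xs : List α) :
    ((x :: xs).any (fun v => v != x)) = (((x :: xs).zip xs).any (fun p => p.1 != p.2)) := by
  induction xs generalizing x with
  | nil => simp
  | cons y ys ih =>
    by_cases hxy : y = x
    · subst hxy
      simpa using ih y
    · have h1 : (y != x) = true := by simp [bne_iff_ne]; exact hxy
      have h2 : (x != y) = true := by simp [bne_iff_ne]; exact Ne.symm hxy
      simp [h1, h2]

theorem key_value_differs_spec : Claim_equal_key_value_differs := by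
  intro key configs _hdom hpre
  unfold Spec_key_value_differs
  match configs with
  | [] => exact absurd rfl hpre
  | c0 :: rest =>
    unfold key_value_differs key_value_differs_alt
    cases h0 : pvLookup c0 key with
    | none => simp only [h0]
    | some val =>
      simp only [h0, kvdLoop_eq_any]
      have hmap :
          ((c0 :: rest).any (fun c => pvLookup c key != some val))
            = (((some val : Option Int) :: rest.map (fun c => pvLookup c key)).any
                (fun v => v != some val)) := by
        simp [List.any_map, Function.comp_def, h0]
      rw [hmap, any_ne_head_eq_any_adjacent]
      have hzip :
          (((some val : Option Int) :: rest.map (fun c => pvLookup c key)).zip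
              (rest.map (fun c => pvLookup c key)))
            = ((c0 :: rest).zip rest).map
                (fun p => (pvLookup p.1 key, pvLookup p.2 key)) := by
        have : ((some val : Option Int) :: rest.map (fun c => pvLookup c key))
            = (c0 :: rest).map (fun c => pvLookup c key) := by simp [h0]
        rw [this, List.zip_map]
        rfl
      rw [hzip, List.any_map]
      rfl
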